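-- pv_equiv track=rewrite | github.com/chinmayajoshi/Chess-Tutor-Bot | older UI/chessboard_ui.py | format_moves_for_llm
-- ===== SOURCE A (Python) =====
-- def format_moves_for_llm(history_san_list):
--     if not history_san_list:
--         return "No moves made yet."
--     move_string = ""
--     move_number = 1
--     for i, move in enumerate(history_san_list):
--         if i % 2 == 0:
--             move_string += f"{move_number}. {move} "
--         else:
--             move_string += f"{move}\n"
--             move_number += 1
--     return move_string.strip()
-- ===== SOURCE B (Python) =====
-- def format_moves_for_llm(history_san_list):
--     if not history_san_list:
--         return "No moves made yet."
--     lines = []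
--     for i in range(0, len(history_san_list), 2):
--         n = i // 2 + 1
--         white = history_san_list[i]
--         if i + 1 < len(history_san_list):
--             lines.append(f"{n}. {white} {history_san_list[i + 1]}")
--         else:
--             lines.append(f"{n}. {white}")
--     return "\n".join(lines).strip()
-- ===== Notes on version B (the rewrite author's own statement) =====
-- stated objective: simpler
-- what changed: Replaces A's index-parity flat loop with a running string concatenation by a two-at-a-time pass that builds one line per move pair and joins the lines with newlines.
import Mathlib
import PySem

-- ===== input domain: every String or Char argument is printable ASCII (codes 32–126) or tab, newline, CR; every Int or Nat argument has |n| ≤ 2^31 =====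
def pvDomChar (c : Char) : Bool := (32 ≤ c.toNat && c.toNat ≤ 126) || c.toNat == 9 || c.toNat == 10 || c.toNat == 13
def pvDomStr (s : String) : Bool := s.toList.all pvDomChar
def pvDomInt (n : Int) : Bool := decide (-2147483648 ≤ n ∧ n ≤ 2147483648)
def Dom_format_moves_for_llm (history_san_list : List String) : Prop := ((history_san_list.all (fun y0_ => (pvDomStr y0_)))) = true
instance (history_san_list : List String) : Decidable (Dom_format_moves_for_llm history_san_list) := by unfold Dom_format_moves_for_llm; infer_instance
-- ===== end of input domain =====

-- B builds one line per move PAIR (stepping the list two at a time) and joins the lines with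
-- newlines, instead of A's index-parity flat loop with a running concatenation. Objective: simpler.

-- ===== PORT A =====
-- A's loop: for i, move in enumerate(...), accumulating move_string (as List Char) and move_number.
def pvLoopA : List String → Nat → Int → List Char → List Char
  | [], _, _, acc => acc
  | move :: rest, i, n, acc =>
    if i % 2 == 0 then
      pvLoopA rest (i + 1) n (acc ++ PySem.Int.toChars n ++ ". ".toList ++ move.toList ++ [' '])
    else
      pvLoopA rest (i + 1) (n + 1) (acc ++ move.toList ++ ['\n'])

def format_moves_for_llm (history_san_list : List String) : String :=
  if history_san_list = [] then "No moves made yet."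
  else String.ofList (PySem.Chars.strip (pvLoopA history_san_list 0 1 []))

-- ===== PORT B =====
-- B's loop over i = 0, 2, 4, … realised as structural recursion two elements at a time;
-- n = i // 2 + 1 is carried directly.
def pvLinesB : List String → Int → List (List Char)
  | [], _ => []
  | [w], n => [PySem.Int.toChars n ++ ". ".toList ++ w.toList]
  | w :: b :: rest, n =>
      (PySem.Int.toChars n ++ ". ".toList ++ w.toList ++ [' '] ++ b.toList) :: pvLinesB rest (n + 1)

def format_moves_for_llm_alt (history_san_list : List String) : String :=
  if history_san_list = [] then "No moves made yet."
  else String.ofList (PySem.Chars.strip (PySem.Chars.join ['\n'] (pvLinesB history_san_list 1)))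

-- ===== PRECONDITION & SPEC =====
def Spec_format_moves_for_llm (history_san_list : List String) (out : String) : Prop := out = format_moves_for_llm_alt history_san_list
instance (history_san_list : List String) (out : String) : Decidable (Spec_format_moves_for_llm history_san_list out) := by unfold Spec_format_moves_for_llm; infer_instance

-- ===== CLAIM (what is proved, stated in full; the proofs are below) =====
def Claim_equal_format_moves_for_llm : Prop := ∀ (history_san_list : List String), Dom_format_moves_for_llm history_san_list → Spec_format_moves_for_llm history_san_list (format_moves_for_llm history_san_list)

-- ===== LEMMAS AND PROOFS =====

theorem strip_append_ws (xs : List Char) (c : Char) (h : PySem.Chars.isspace c = true) :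
    PySem.Chars.strip (xs ++ [c]) = PySem.Chars.strip xs := by
  simp [PySem.Chars.strip, PySem.Chars.lstrip, List.dropWhile_append]
  split
  · next hall =>
      simp [List.dropWhile, h, PySem.Chars.rstrip]
      exact fun x hx => hall x ((List.dropWhile_sublist _).mem hx)
  · simp [PySem.Chars.rstrip, h]

-- A's flat loop, started at an even index, produces exactly B's joined lines plus one
-- trailing whitespace character (' ' after an unpaired white move, '\n' after a black move).
theorem loopA_eq_join (ms : List String) (k : Nat) (n : Int) (acc : List Char) (hne : ms ≠ []) :
    pvLoopA ms (2 * k) n acc =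
      acc ++ PySem.Chars.join ['\n'] (pvLinesB ms n) ++
        (if ms.length % 2 = 0 then ['\n'] else [' ']) := by
  induction ms, n using pvLinesB.induct generalizing k acc with
  | case1 n => exact absurd rfl hne
  | case2 w n =>
      simp [pvLoopA, pvLinesB, PySem.Chars.join, Nat.mul_mod_right, List.intercalate]
  | case3 w b rest n ih =>
      have h1 : (2 * k) % 2 == 0 := by simp [Nat.mul_mod_right]
      have h2 : ¬ ((2 * k + 1) % 2 == 0) := by simp [Nat.add_mod, Nat.mul_mod_right]
      rw [pvLoopA, if_pos h1, pvLoopA, if_neg h2]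
      rcases rest with _ | ⟨r, rs⟩
      · simp [pvLoopA, pvLinesB, PySem.Chars.join, List.intercalate]
      · have := ih (k + 1) (acc ++ PySem.Int.toChars n ++ ". ".toList ++ w.toList ++ [' '] ++ b.toList ++ ['\n']) (by simp)
        have harg : 2 * k + 1 + 1 = 2 * (k + 1) := by omega
        rw [harg, this]
        obtain ⟨l, L, hL⟩ : ∃ l L, pvLinesB (r :: rs) (n + 1) = l :: L := by
          cases rs <;> exact ⟨_, _, rfl⟩
        have hlen : (w :: b :: r :: rs).length % 2 = (r :: rs).length % 2 := by
          simp [Nat.add_mod]; omega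
        rw [show pvLinesB (w :: b :: r :: rs) n =
              (PySem.Int.toChars n ++ ". ".toList ++ w.toList ++ [' '] ++ b.toList) ::
                pvLinesB (r :: rs) (n + 1) from rfl,
            hL, PySem.Chars.join_cons_cons, hlen]
        simp

-- ===== VERDICT (by name: the statement is the Claim_ definition above) =====
theorem format_moves_for_llm_spec : Claim_equal_format_moves_for_llm := by
  intro hs _
  unfold Spec_format_moves_for_llm format_moves_for_llm format_moves_for_llm_alt
  rcases hs with _ | ⟨m, rest⟩
  · rfl
  · have h0 : (0 : Nat) = 2 * 0 := rfl
    rw [if_neg (by simp), if_neg (by simp), h0,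
        loopA_eq_join (m :: rest) 0 1 [] (by simp)]
    split
    · rw [List.nil_append, strip_append_ws _ '\n' (by decide)]
    · rw [List.nil_append, strip_append_ws _ ' ' (by decide)]
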